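-- pv_equiv track=rewrite | github.com/gisbi-kim/robo-careers | scripts/common/metrics.py | year_series
-- ===== SOURCE A (Python) =====
-- from typing import Dict, Iterable, List, Tuple
--
-- def year_series(papers: List[dict], year_start: int, year_end: int) -> Dict[int, dict]:
--     """Per-year aggregates for one author's papers."""
--     out = {y: {"n": 0, "cites": 0, "max_cites": 0} for y in range(year_start, year_end + 1)}
--     for p in papers:
--         y = p["year"]
--         if year_start <= y <= year_end:
--             out[y]["n"] += 1
--             out[y]["cites"] += p["cites"]
--             out[y]["max_cites"] = max(out[y]["max_cites"], p["cites"])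
--     return out
-- ===== SOURCE B (Python) =====
-- def year_series(papers, year_start, year_end):
--     """Per-year aggregates: one grouping pass into citation buckets, then a
--     reduce per year of the range (bucket-then-reduce instead of A's running
--     in-place aggregate updates)."""
--     buckets = {}
--     for p in papers:
--         y = p["year"]
--         if year_start <= y <= year_end:
--             buckets.setdefault(y, []).append(p["cites"])
--     return {y: _agg(buckets.get(y, [])) for y in range(year_start, year_end + 1)}
--
--
-- def _agg(L):
--     return {"n": len(L), "cites": sum(L), "max_cites": max([0] + L)}
-- ===== Notes on version B (the rewrite author's own statement) =====
-- stated objective: alternative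
-- what changed: A keeps one dict of per-year running aggregates it updates in place per paper; B first groups the in-range papers' cite counts into per-year buckets, then builds the result by reducing each bucket (len/sum/max) in a comprehension over the year range.
import Mathlib
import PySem

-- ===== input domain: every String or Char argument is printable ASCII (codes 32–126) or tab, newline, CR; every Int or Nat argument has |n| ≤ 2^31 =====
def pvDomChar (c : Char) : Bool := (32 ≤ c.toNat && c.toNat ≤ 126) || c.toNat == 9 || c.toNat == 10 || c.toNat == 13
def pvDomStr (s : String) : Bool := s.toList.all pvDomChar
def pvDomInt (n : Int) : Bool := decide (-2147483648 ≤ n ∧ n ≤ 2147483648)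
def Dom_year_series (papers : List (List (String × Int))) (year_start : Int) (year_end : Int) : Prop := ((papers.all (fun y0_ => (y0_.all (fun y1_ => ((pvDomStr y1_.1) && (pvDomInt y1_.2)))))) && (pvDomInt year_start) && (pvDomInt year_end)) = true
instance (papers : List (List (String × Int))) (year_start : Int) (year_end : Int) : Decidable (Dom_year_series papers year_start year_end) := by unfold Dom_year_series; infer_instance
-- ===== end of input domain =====

-- B replaces A's single in-place running-aggregate dict with a grouping pass into per-year
-- citation buckets followed by a per-year reduce (len/sum/max) over the year range (objective:
-- alternative decomposition, same cost).

-- ===== PORT A =====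
-- one iteration of A's 'for p in papers' loop; the 'none' branches are where Python raises
-- KeyError (p["year"] / p["cites"] missing) — those inputs are excluded by Pre_year_series
def ysA_step (year_start year_end : Int) (d : PySem.Dict Int (PySem.Dict String Int))
    (p : List (String × Int)) : PySem.Dict Int (PySem.Dict String Int) :=
  match (PySem.Dict.mk p).get? "year" with
  | none => d
  | some y =>
    if year_start ≤ y ∧ y ≤ year_end then
      let c : Int := ((PySem.Dict.mk p).get? "cites").getD 0
      d.modify y PySem.Dict.empty (fun r =>
        let r1 := r.insert "n" (r.getD "n" 0 + 1)
        let r2 := r1.insert "cites" (r1.getD "cites" 0 + c)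
        r2.insert "max_cites" (max (r2.getD "max_cites" 0) c))
    else d

def year_series (papers : List (List (String × Int))) (year_start : Int) (year_end : Int) : List (Int × List (String × Int)) :=
  let out0 : PySem.Dict Int (PySem.Dict String Int) :=
    (PySem.List.pyRange year_start (year_end + 1) 1).foldl
      (fun d y => d.insert y (PySem.Dict.ofList [("n", 0), ("cites", 0), ("max_cites", 0)]))
      PySem.Dict.empty
  let out := papers.foldl (ysA_step year_start year_end) out0
  out.items.map (fun q => (q.1, q.2.items))

-- ===== PORT B =====
-- one iteration of Source B's grouping loop ('buckets.setdefault(y, []).append(p["cites"])');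
-- 'none' = Python KeyError, excluded by Pre_year_series
def ysB_bucket (year_start year_end : Int) (d : PySem.Dict Int (List Int))
    (p : List (String × Int)) : PySem.Dict Int (List Int) :=
  match (PySem.Dict.mk p).get? "year" with
  | none => d
  | some y =>
    if year_start ≤ y ∧ y ≤ year_end then
      d.modify y [] (fun L => L ++ [((PySem.Dict.mk p).get? "cites").getD 0])
    else d

-- Source B's _agg; max([0] + L) is never empty, so '.getD 0' only totalises the Option
def ysB_agg (L : List Int) : List (String × Int) :=
  [("n", PySem.List.len L), ("cites", L.sum),
   ("max_cites", (PySem.List.max? (0 :: L) (fun y => y)).getD 0)]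

def year_series_alt (papers : List (List (String × Int))) (year_start : Int) (year_end : Int) : List (Int × List (String × Int)) :=
  let buckets := papers.foldl (ysB_bucket year_start year_end) PySem.Dict.empty
  (PySem.List.pyRange year_start (year_end + 1) 1).map
    (fun y => (y, ysB_agg (buckets.getD y [])))

-- ===== PRECONDITION & SPEC =====
-- Pre_ excludes exactly the inputs where the Python A raises KeyError: a paper without a
-- "year" key, or an in-range paper without a "cites" key (B raises there too).
def Pre_year_series (papers : List (List (String × Int))) (year_start : Int) (year_end : Int) : Prop :=
  papers.all (fun p =>
    match (PySem.Dict.mk p).get? "year" with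
    | none => false
    | some y =>
      !(decide (year_start ≤ y) && decide (y ≤ year_end)) || ((PySem.Dict.mk p).get? "cites").isSome) = true
instance (papers : List (List (String × Int))) (year_start : Int) (year_end : Int) : Decidable (Pre_year_series papers year_start year_end) := by unfold Pre_year_series; infer_instance

def pvWitness_year_series : (List (List (String × Int))) × Int × Int :=
  ([[("year", 2020), ("cites", 3)], [("year", 1999), ("cites", 7)]], 2019, 2021)

def Spec_year_series (papers : List (List (String × Int))) (year_start : Int) (year_end : Int) (out : List (Int × List (String × Int))) : Prop := out = year_series_alt papers year_start year_end
instance (papers : List (List (String × Int))) (year_start : Int) (year_end : Int) (out : List (Int × List (String × Int))) : Decidable (Spec_year_series papers year_start year_end out) := by unfold Spec_year_series; infer_instance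

-- ===== CLAIM (what is proved, stated in full; the proofs are below) =====
def Claim_equal_year_series : Prop := ∀ (papers : List (List (String × Int))) (year_start : Int) (year_end : Int), Dom_year_series papers year_start year_end → Pre_year_series papers year_start year_end → Spec_year_series papers year_start year_end (year_series papers year_start year_end)

-- ===== LEMMAS AND PROOFS =====

-- the citation count Source B appends / A adds for a paper p
def pvCOf (p : List (String × Int)) : Int := ((PySem.Dict.mk p).get? "cites").getD 0

-- the citation list a given in-range year y collects from papers ps
def pvCs (y : Int) (ps : List (List (String × Int))) : List Int :=
  (ps.filter (fun p => (PySem.Dict.mk p).get? "year" == some y)).map pvCOf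

-- A's inner record update on out[y]
def pvUpd (r : PySem.Dict String Int) (c : Int) : PySem.Dict String Int :=
  let r1 := r.insert "n" (r.getD "n" 0 + 1)
  let r2 := r1.insert "cites" (r1.getD "cites" 0 + c)
  r2.insert "max_cites" (max (r2.getD "max_cites" 0) c)


theorem pvBucket_getD (year_start year_end y : Int) (hy1 : year_start ≤ y) (hy2 : y ≤ year_end) :
    ∀ (ps : List (List (String × Int))) (d : PySem.Dict Int (List Int)),
    (ps.foldl (ysB_bucket year_start year_end) d).getD y [] = d.getD y [] ++ pvCs y ps := by
  intro ps
  induction ps with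
  | nil => intro d; simp [pvCs]
  | cons p ps ih =>
    intro d
    rw [List.foldl_cons, ih]
    have hfil : pvCs y (p :: ps)
        = (if ((PySem.Dict.mk p).get? "year" == some y) then pvCOf p :: pvCs y ps else pvCs y ps) := by
      simp only [pvCs, List.filter_cons]
      split <;> simp
    rw [hfil]
    cases hgy : (PySem.Dict.mk p).get? "year" with
    | none => simp [ysB_bucket, hgy]
    | some y' =>
      by_cases hr : year_start ≤ y' ∧ y' ≤ year_end
      · by_cases hyy : y' = y
        · subst hyy
          simp [ysB_bucket, hgy, hr, pvCOf]
        · simp [ysB_bucket, hgy, hr, PySem.Dict.getD_modify, hyy, Ne.symm hyy]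
      · have hyy : ¬ (y' = y) := by rintro rfl; exact hr ⟨hy1, hy2⟩
        simp [ysB_bucket, hgy, hr, hyy]


theorem pvA_getD (year_start year_end y : Int) (hy1 : year_start ≤ y) (hy2 : y ≤ year_end) :
    ∀ (ps : List (List (String × Int))) (d : PySem.Dict Int (PySem.Dict String Int)),
    (ps.foldl (ysA_step year_start year_end) d).getD y PySem.Dict.empty
      = (pvCs y ps).foldl pvUpd (d.getD y PySem.Dict.empty) := by
  intro ps
  induction ps with
  | nil => intro d; simp [pvCs]
  | cons p ps ih =>
    intro d
    rw [List.foldl_cons, ih]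
    have hfil : pvCs y (p :: ps)
        = (if ((PySem.Dict.mk p).get? "year" == some y) then pvCOf p :: pvCs y ps else pvCs y ps) := by
      simp only [pvCs, List.filter_cons]
      split <;> simp
    rw [hfil]
    cases hgy : (PySem.Dict.mk p).get? "year" with
    | none => simp [ysA_step, hgy]
    | some y' =>
      by_cases hr : year_start ≤ y' ∧ y' ≤ year_end
      · by_cases hyy : y' = y
        · subst hyy
          simp [ysA_step, hgy, hr, pvCOf, pvUpd]
        · simp [ysA_step, hgy, hr, PySem.Dict.getD_modify, hyy, Ne.symm hyy]
      · have hyy : ¬ (y' = y) := by rintro rfl; exact hr ⟨hy1, hy2⟩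
        simp [ysA_step, hgy, hr, hyy]


theorem pvA_keys (year_start year_end : Int) :
    ∀ (ps : List (List (String × Int))) (d : PySem.Dict Int (PySem.Dict String Int)),
    (∀ y, year_start ≤ y → y ≤ year_end → d.contains y = true) →
    (ps.foldl (ysA_step year_start year_end) d).keys = d.keys := by
  intro ps
  induction ps with
  | nil => intro d _; rfl
  | cons p ps ih =>
    intro d h
    rw [List.foldl_cons]
    have hstep : (ysA_step year_start year_end d p).keys = d.keys ∧
        (∀ y, year_start ≤ y → y ≤ year_end → (ysA_step year_start year_end d p).contains y = true) := by
      cases hgy : (PySem.Dict.mk p).get? "year" with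
      | none => exact ⟨by simp [ysA_step, hgy], fun y h1 h2 => by simp [ysA_step, hgy, h y h1 h2]⟩
      | some y' =>
        by_cases hr : year_start ≤ y' ∧ y' ≤ year_end
        · constructor
          · simp [ysA_step, hgy, hr, PySem.Dict.keys_modify,
              PySem.Dict.keys_insert_of_contains, h y' hr.1 hr.2]
          · intro y h1 h2
            simp [ysA_step, hgy, hr, PySem.Dict.contains_modify, h y h1 h2]
        · exact ⟨by simp [ysA_step, hgy, hr], fun y h1 h2 => by simp [ysA_step, hgy, hr, h y h1 h2]⟩
    rw [ih _ hstep.2, hstep.1]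


theorem pvRec_fold (L : List Int) : ∀ (a b c : Int),
    (L.foldl pvUpd (PySem.Dict.mk [("n", a), ("cites", b), ("max_cites", c)])).items
      = [("n", a + L.length), ("cites", b + L.sum), ("max_cites", L.foldl max c)] := by
  induction L with
  | nil => intro a b c; simp
  | cons c0 L ih =>
    intro a b c
    have hstep : pvUpd (PySem.Dict.mk [("n", a), ("cites", b), ("max_cites", c)]) c0
        = PySem.Dict.mk [("n", a + 1), ("cites", b + c0), ("max_cites", max c c0)] := by
      simp [pvUpd, PySem.Dict.insert, PySem.Dict.getD, PySem.Dict.get?, PySem.Dict.contains,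
        List.find?]
    rw [List.foldl_cons, hstep, ih]
    simp [List.sum_cons]
    constructor
    · omega
    · ring


def pvBase : PySem.Dict String Int := PySem.Dict.ofList [("n", 0), ("cites", 0), ("max_cites", 0)]

def pvOut0 (year_start year_end : Int) : PySem.Dict Int (PySem.Dict String Int) :=
  (PySem.List.pyRange year_start (year_end + 1) 1).foldl (fun d y => d.insert y pvBase) PySem.Dict.empty

-- ===== VERDICT (by name: the statement is the Claim_ definition above) =====
theorem year_series_spec : Claim_equal_year_series := by
  intro papers year_start year_end _ _
  unfold Spec_year_series year_series year_series_alt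
  change ((papers.foldl (ysA_step year_start year_end) (pvOut0 year_start year_end)).items).map
      (fun q => (q.1, q.2.items))
    = (PySem.List.pyRange year_start (year_end + 1) 1).map
      (fun y => (y, ysB_agg ((papers.foldl (ysB_bucket year_start year_end) PySem.Dict.empty).getD y [])))
  have hnodupR : (PySem.List.pyRange year_start (year_end + 1) 1).Nodup :=
    PySem.List.nodup_pyRange_one year_start (year_end + 1)
  have hitems0 : (pvOut0 year_start year_end).items
      = (PySem.List.pyRange year_start (year_end + 1) 1).map (fun y => (y, pvBase)) := by
    have := PySem.Dict.items_foldl_insert_fresh (PySem.List.pyRange year_start (year_end + 1) 1)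
      (fun y => y) (fun _ => pvBase) PySem.Dict.empty (by intro y _; simp) (by simpa using hnodupR)
    simpa [pvOut0] using this
  have hkeys0 : (pvOut0 year_start year_end).keys = PySem.List.pyRange year_start (year_end + 1) 1 := by
    simp [PySem.Dict.keys, hitems0, List.map_map, Function.comp_def]
  have hcont0 : ∀ y, year_start ≤ y → y ≤ year_end → (pvOut0 year_start year_end).contains y = true := by
    intro y h1 h2
    rw [PySem.Dict.contains_eq_decide_mem_keys, hkeys0]
    simp only [decide_eq_true_eq, PySem.List.mem_pyRange_one]
    omega
  have hkeysOut : (papers.foldl (ysA_step year_start year_end) (pvOut0 year_start year_end)).keys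
      = PySem.List.pyRange year_start (year_end + 1) 1 := by
    rw [pvA_keys year_start year_end papers _ hcont0, hkeys0]
  have hitemsOut : (papers.foldl (ysA_step year_start year_end) (pvOut0 year_start year_end)).items
      = (PySem.List.pyRange year_start (year_end + 1) 1).map
        (fun y => (y, (papers.foldl (ysA_step year_start year_end) (pvOut0 year_start year_end)).getD y PySem.Dict.empty)) := by
    rw [PySem.Dict.items_eq_map_keys _ (by rw [hkeysOut]; exact hnodupR) PySem.Dict.empty, hkeysOut]
  rw [hitemsOut, List.map_map]
  apply List.map_congr_left
  intro y hyR
  obtain ⟨h1, h2⟩ := PySem.List.mem_pyRange_one.mp hyR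
  have h2' : y ≤ year_end := by omega
  have hget0 : (pvOut0 year_start year_end).getD y PySem.Dict.empty = pvBase := by
    refine PySem.Dict.getD_of_mem_items _ ?_ (by rw [hkeys0]; exact hnodupR) _
    rw [hitems0]
    exact List.mem_map.mpr ⟨y, hyR, rfl⟩
  have hA := pvA_getD year_start year_end y h1 h2' papers (pvOut0 year_start year_end)
  have hB := pvBucket_getD year_start year_end y h1 h2' papers PySem.Dict.empty
  have hbase : pvBase = PySem.Dict.mk [("n", 0), ("cites", 0), ("max_cites", 0)] := by decide
  simp only [Function.comp_apply, hA, hget0, hbase, pvRec_fold, hB, PySem.Dict.getD_empty,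
    List.nil_append, ysB_agg, PySem.List.len_eq, PySem.List.max?_id_cons, Option.getD_some]
  simp
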